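-- pv_equiv track=rewrite | github.com/miilv/pilot-shell | installer/steps/settings_merge.py | _merge_dict_field
-- ===== SOURCE A (Python) =====
-- from typing import Any
--
-- def _merge_dict_field(
--     baseline: dict[str, Any] | None,
--     current: dict[str, Any],
--     incoming: dict[str, Any],
-- ) -> dict[str, Any]:
--     """Merge a dict field (env, attribution, etc.) key by key.
--
--     - New incoming keys are added.
--     - User-only keys (not in incoming) are preserved.
--     - If user changed a value from baseline, keep user's value.
--     - Otherwise update to incoming value.
--     """
--     result: dict[str, Any] = {}
--     all_keys = set(incoming.keys()) | set(current.keys())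
--
--     for key in all_keys:
--         if key not in incoming:
--             result[key] = current[key]
--         elif key not in current:
--             result[key] = incoming[key]
--         elif baseline is None or key not in baseline:
--             result[key] = incoming[key]
--         elif current[key] == baseline[key]:
--             result[key] = incoming[key]
--         else:
--             result[key] = current[key]
--
--     return result
-- ===== SOURCE B (Python) =====
-- def _merge_dict_field(baseline, current, incoming):
--     # Stage 1: union with incoming taking precedence (incoming first, then the
--     # user-only keys of current); no per-key merge decision is made here.
--     result = dict(incoming)
--     result.update((k, v) for k, v in current.items() if k not in incoming)
--     # Stage 2: the BASELINE drives the overrides — restore the user's value for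
--     # exactly those shared keys the user edited away from baseline.
--     for key, base_val in (baseline or {}).items():
--         if key in current and key in incoming and current[key] != base_val:
--             result[key] = current[key]
--     return result
-- ===== Notes on version B (the rewrite author's own statement) =====
-- stated objective: alternative
-- what changed: A makes one pass over the union of key sets with a five-way branch deciding each key; B never examines keys one by one: it first builds the incoming-precedence union (dict(incoming) updated with current's incoming-free items) and then iterates the BASELINE, restoring the user's value only for shared keys whose current value departs from the baseline entry.
import Mathlib
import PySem

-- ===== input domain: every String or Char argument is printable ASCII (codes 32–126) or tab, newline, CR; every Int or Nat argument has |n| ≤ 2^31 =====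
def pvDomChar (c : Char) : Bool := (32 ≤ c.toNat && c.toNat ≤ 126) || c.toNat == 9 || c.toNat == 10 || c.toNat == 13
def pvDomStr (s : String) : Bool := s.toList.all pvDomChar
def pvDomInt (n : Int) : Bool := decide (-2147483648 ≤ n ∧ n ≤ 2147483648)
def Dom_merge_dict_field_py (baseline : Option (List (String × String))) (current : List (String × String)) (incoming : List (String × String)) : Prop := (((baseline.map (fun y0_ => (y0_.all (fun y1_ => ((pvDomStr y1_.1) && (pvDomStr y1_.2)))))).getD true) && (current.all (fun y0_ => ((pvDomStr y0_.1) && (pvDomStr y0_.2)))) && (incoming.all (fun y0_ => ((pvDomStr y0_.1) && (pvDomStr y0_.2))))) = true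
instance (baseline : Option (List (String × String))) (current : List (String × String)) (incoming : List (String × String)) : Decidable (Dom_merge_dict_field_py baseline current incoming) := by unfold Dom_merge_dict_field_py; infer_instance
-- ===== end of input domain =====

-- B replaces A's per-key five-way decision over the union of key sets by two stages: build the
-- incoming-precedence union, then walk the BASELINE restoring the user's edits (objective:
-- alternative). Equivalence is on the return value; neither program mutates its arguments.

-- ===== PORT A =====
-- Literal transliteration of A (locals inlined; Python iterates the key SET in hash order,
-- the port iterates it in PySem.Set list order — dict outputs are compared ignoring order).
def merge_dict_field_py (baseline : Option (List (String × String))) (current : List (String × String)) (incoming : List (String × String)) : List (String × String) :=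
  ((PySem.Set.union (PySem.Set.ofList (PySem.Dict.keys (PySem.Dict.mk incoming)))
      (PySem.Set.ofList (PySem.Dict.keys (PySem.Dict.mk current)))).foldl
    (fun (r : PySem.Dict String String) key =>
      if (PySem.Dict.mk incoming).contains key = false then r.insert key ((PySem.Dict.mk current).getD key "")
      else if (PySem.Dict.mk current).contains key = false then r.insert key ((PySem.Dict.mk incoming).getD key "")
      else match baseline with
        | none => r.insert key ((PySem.Dict.mk incoming).getD key "")
        | some b =>
          if (PySem.Dict.mk b).contains key = false then r.insert key ((PySem.Dict.mk incoming).getD key "")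
          else if (PySem.Dict.mk current).getD key "" == (PySem.Dict.mk b).getD key "" then r.insert key ((PySem.Dict.mk incoming).getD key "")
          else r.insert key ((PySem.Dict.mk current).getD key "")) PySem.Dict.empty).items

-- ===== PORT B =====
-- Literal transliteration of B: result = dict(incoming); result.update(filtered current items);
-- then a loop over (baseline or {}).items() restoring the user's edited values.
def merge_dict_field_py_alt (baseline : Option (List (String × String))) (current : List (String × String)) (incoming : List (String × String)) : List (String × String) :=
  ((match baseline with | none => ([] : List (String × String)) | some b => b).foldl
      (fun (r : PySem.Dict String String) (kv : String × String) =>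
        if ((PySem.Dict.mk current).contains kv.1 && (PySem.Dict.mk incoming).contains kv.1
            && !((PySem.Dict.mk current).getD kv.1 "" == kv.2))
        then r.insert kv.1 ((PySem.Dict.mk current).getD kv.1 "")
        else r)
      (current.foldl
        (fun (r : PySem.Dict String String) (kv : String × String) =>
          if (PySem.Dict.mk incoming).contains kv.1 = false then r.insert kv.1 kv.2 else r)
        (PySem.Dict.mk incoming))).items

-- ===== PRECONDITION & SPEC =====
-- Pre_: the association lists standing for the dict arguments have pairwise-distinct keys.
-- Every Python dict satisfies this (a duplicate-key association list corresponds to no Python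
-- input), so no input A returns on is excluded.
def Pre_merge_dict_field_py (baseline : Option (List (String × String))) (current : List (String × String)) (incoming : List (String × String)) : Prop :=
  (current.map Prod.fst).Nodup ∧ (incoming.map Prod.fst).Nodup ∧
    (((baseline.getD []).map Prod.fst)).Nodup
instance (baseline : Option (List (String × String))) (current : List (String × String)) (incoming : List (String × String)) : Decidable (Pre_merge_dict_field_py baseline current incoming) := by unfold Pre_merge_dict_field_py; infer_instance

def pvWitness_merge_dict_field_py : (Option (List (String × String))) × (List (String × String)) × (List (String × String)) :=
  (some [("a", "1")], [("a", "2"), ("c", "3")], [("a", "9"), ("b", "4")])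

def Spec_merge_dict_field_py (baseline : Option (List (String × String))) (current : List (String × String)) (incoming : List (String × String)) (out : List (String × String)) : Prop := out = merge_dict_field_py_alt baseline current incoming
instance (baseline : Option (List (String × String))) (current : List (String × String)) (incoming : List (String × String)) (out : List (String × String)) : Decidable (Spec_merge_dict_field_py baseline current incoming out) := by unfold Spec_merge_dict_field_py; infer_instance

-- ===== CLAIM (what is proved, stated in full; the proofs are below) =====
def Claim_equal_merge_dict_field_py : Prop := ∀ (baseline : Option (List (String × String))) (current : List (String × String)) (incoming : List (String × String)), Dom_merge_dict_field_py baseline current incoming → Pre_merge_dict_field_py baseline current incoming → Spec_merge_dict_field_py baseline current incoming (merge_dict_field_py baseline current incoming)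

-- ===== LEMMAS AND PROOFS =====

lemma pv_update_eq (t s : List String) (ht : t.Nodup) :
    PySem.Set.update s t = s ++ t.filter (fun x => !s.contains x) := by
  induction t generalizing s with
  | nil => simp [PySem.Set.update]
  | cons x t ih =>
    rcases List.nodup_cons.mp ht with ⟨hx, ht'⟩
    by_cases h : x ∈ s
    · have h1 : PySem.Set.update s (x :: t) = PySem.Set.update s t := by
        simp [PySem.Set.update, PySem.Set.add, PySem.Set.contains, h]
      rw [h1, ih s ht']
      simp [h]
    · have h1 : PySem.Set.update s (x :: t) = PySem.Set.update (s ++ [x]) t := by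
        simp [PySem.Set.update, PySem.Set.add, PySem.Set.contains, h]
      rw [h1, ih _ ht']
      have hfil : t.filter (fun y => !(s ++ [x]).contains y) = t.filter (fun y => !s.contains y) := by
        apply List.filter_congr
        intro y hy
        have hne : y ≠ x := fun e => hx (e ▸ hy)
        simp [hne]
      rw [hfil]
      simp [h]

lemma pv_ofList_nodup (l : List String) (h : l.Nodup) : PySem.Set.ofList l = l := by
  have h0 : PySem.Set.ofList l = PySem.Set.update [] l := rfl
  rw [h0, pv_update_eq l [] h]
  simp

lemma pv_contains_mk (l : List (String × String)) (k : String) :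
    (PySem.Dict.mk l).contains k = (l.map Prod.fst).contains k := by
  simp only [PySem.Dict.contains]
  rw [Bool.eq_iff_iff]
  constructor
  · intro h
    rcases List.any_eq_true.mp h with ⟨p, hp, he⟩
    exact List.elem_eq_true_of_mem (List.mem_map.mpr ⟨p, hp, (beq_iff_eq.mp he)⟩)
  · intro h
    rcases List.mem_map.mp (List.mem_of_elem_eq_true h) with ⟨p, hp, he⟩
    exact List.any_eq_true.mpr ⟨p, hp, beq_iff_eq.mpr he⟩

lemma pv_get?_append (l : List (String × String)) (p : String × String) (k : String) :
    (PySem.Dict.mk (l ++ [p])).get? k =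
      ((PySem.Dict.mk l).get? k).or (if p.1 = k then some p.2 else none) := by
  simp only [PySem.Dict.get?, List.find?_append, List.find?]
  cases hbe : (p.1 == k) <;>
    cases List.find? (fun p => p.1 == k) l <;>
      simp_all

lemma pv_get?_append_of_ne (l : List (String × String)) (p : String × String) (k : String)
    (h : p.1 ≠ k) : (PySem.Dict.mk (l ++ [p])).get? k = (PySem.Dict.mk l).get? k := by
  rw [pv_get?_append]
  simp [h]

lemma pv_get?_append_self (l : List (String × String)) (p : String × String)
    (h : p.1 ∉ l.map Prod.fst) : (PySem.Dict.mk (l ++ [p])).get? p.1 = some p.2 := by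
  rw [pv_get?_append]
  have : (PySem.Dict.mk l).get? p.1 = none :=
    (PySem.Dict.get?_eq_none_iff_not_mem_keys _ _).mpr (by simpa [PySem.Dict.keys] using h)
  simp [this]

-- value of key k (with union-stage value v) after the baseline-override loop has consumed bs
def pvValC (current : List (String × String)) (bs : List (String × String)) (k v : String) : String :=
  match (PySem.Dict.mk bs).get? k with
  | none => v
  | some bv =>
    if ((PySem.Dict.mk current).contains k && !((PySem.Dict.mk current).getD k "" == bv))
    then (PySem.Dict.mk current).getD k "" else v

-- Stage 1 of B: items of the incoming-precedence union
lemma pvB_stage1 (incoming : List (String × String)) :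
    ∀ cur : List (String × String), (cur.map Prod.fst).Nodup →
    (cur.foldl
        (fun (r : PySem.Dict String String) kv =>
          if (PySem.Dict.mk incoming).contains kv.1 = false then r.insert kv.1 kv.2 else r)
        (PySem.Dict.mk incoming)).items
      = incoming ++ cur.filter (fun q => !(PySem.Dict.mk incoming).contains q.1) := by
  intro cur
  induction cur using List.reverseRecOn with
  | nil => intro _; simp
  | append_singleton cs p ih =>
    intro hnd
    have hnd' : (cs.map Prod.fst ++ [p.1]).Nodup := by simpa using hnd
    obtain ⟨hcs, -, hdisj⟩ := List.nodup_append.mp hnd'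
    have hp : p.1 ∉ cs.map Prod.fst := fun hmem => hdisj p.1 hmem p.1 (by simp) rfl
    have hacc := ih hcs
    rw [List.foldl_append, List.foldl_cons, List.foldl_nil]
    set acc := cs.foldl
        (fun (r : PySem.Dict String String) kv =>
          if (PySem.Dict.mk incoming).contains kv.1 = false then r.insert kv.1 kv.2 else r)
        (PySem.Dict.mk incoming) with haccdef
    clear haccdef ih
    by_cases hc : (PySem.Dict.mk incoming).contains p.1 = false
    · have hpinc : p.1 ∉ incoming.map Prod.fst := by
        rw [pv_contains_mk] at hc
        simpa using hc
      rw [if_pos hc]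
      have hcontacc : acc.contains p.1 = false := by
        have hnot : ¬ (acc.contains p.1 = true) := by
          rw [PySem.Dict.contains_iff_mem_keys]
          simp only [PySem.Dict.keys, hacc, List.map_append, List.mem_append]
          rintro (hmem | hmem)
          · exact hpinc hmem
          · rcases List.mem_map.mp hmem with ⟨r, hr, he⟩
            exact hp (List.mem_map.mpr ⟨r, List.mem_of_mem_filter hr, he⟩)
        exact eq_false_of_ne_true hnot
      rw [PySem.Dict.items_insert_of_not_contains acc p.2 hcontacc, hacc]
      rw [List.filter_append]
      have hcf : (incoming.any fun r => r.1 == p.1) = false := by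
        simpa [PySem.Dict.contains] using hc
      simp [List.append_assoc, hcf]
    · rw [if_neg hc]
      have hc' : (PySem.Dict.mk incoming).contains p.1 = true := eq_true_of_ne_false hc
      rw [hacc, List.filter_append]
      have hct : (incoming.any fun r => r.1 == p.1) = true := by
        simpa [PySem.Dict.contains] using hc'
      simp [hct]

-- Stage 2 of B: the baseline loop rewrites only the incoming part, entrywise by pvValC
lemma pvB_stage2 (current incoming : List (String × String)) :
    ∀ bs : List (String × String), (bs.map Prod.fst).Nodup →
    (bs.foldl
      (fun (r : PySem.Dict String String) (kv : String × String) =>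
        if ((PySem.Dict.mk current).contains kv.1 && (PySem.Dict.mk incoming).contains kv.1
            && !((PySem.Dict.mk current).getD kv.1 "" == kv.2))
        then r.insert kv.1 ((PySem.Dict.mk current).getD kv.1 "")
        else r)
      (PySem.Dict.mk (incoming ++ current.filter (fun q => !(PySem.Dict.mk incoming).contains q.1)))).items
      = incoming.map (fun q => (q.1, pvValC current bs q.1 q.2))
        ++ current.filter (fun q => !(PySem.Dict.mk incoming).contains q.1) := by
  intro bs
  induction bs using List.reverseRecOn with
  | nil =>
    intro _
    simp [pvValC, PySem.Dict.get?]
  | append_singleton bs p ih =>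
    intro hnd
    have hnd' : (bs.map Prod.fst ++ [p.1]).Nodup := by simpa using hnd
    obtain ⟨hbs, -, hdisj⟩ := List.nodup_append.mp hnd'
    have hp : p.1 ∉ bs.map Prod.fst := fun hmem => hdisj p.1 hmem p.1 (by simp) rfl
    have hacc := ih hbs
    rw [List.foldl_append, List.foldl_cons, List.foldl_nil]
    set acc := bs.foldl
      (fun (r : PySem.Dict String String) (kv : String × String) =>
        if ((PySem.Dict.mk current).contains kv.1 && (PySem.Dict.mk incoming).contains kv.1
            && !((PySem.Dict.mk current).getD kv.1 "" == kv.2))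
        then r.insert kv.1 ((PySem.Dict.mk current).getD kv.1 "")
        else r)
      (PySem.Dict.mk (incoming ++ current.filter (fun q => !(PySem.Dict.mk incoming).contains q.1))) with haccdef
    clear haccdef ih
    by_cases hc : ((PySem.Dict.mk current).contains p.1 && (PySem.Dict.mk incoming).contains p.1
        && !((PySem.Dict.mk current).getD p.1 "" == p.2)) = true
    · -- override step: p.1 is a shared key the user edited; overwrite in place
      rw [if_pos hc]
      obtain ⟨⟨hcurc, hincc⟩, hne⟩ :
          ((PySem.Dict.mk current).contains p.1 = true ∧ (PySem.Dict.mk incoming).contains p.1 = true)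
            ∧ (!((PySem.Dict.mk current).getD p.1 "" == p.2)) = true := by
        constructor
        · constructor
          · exact (Bool.and_eq_true _ _ |>.mp ((Bool.and_eq_true _ _ |>.mp hc).1)).1
          · exact (Bool.and_eq_true _ _ |>.mp ((Bool.and_eq_true _ _ |>.mp hc).1)).2
        · exact (Bool.and_eq_true _ _ |>.mp hc).2
      have hpinc : p.1 ∈ incoming.map Prod.fst := by
        rw [pv_contains_mk] at hincc
        exact List.mem_of_elem_eq_true hincc
      have hcontacc : acc.contains p.1 = true := by
        rw [PySem.Dict.contains_iff_mem_keys]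
        simp only [PySem.Dict.keys, hacc, List.map_append, List.map_map, List.mem_append]
        left
        rcases List.mem_map.mp hpinc with ⟨q, hq, he⟩
        exact List.mem_map.mpr ⟨q, hq, by simpa using he⟩
      rw [PySem.Dict.items_insert_of_contains acc _ hcontacc, hacc]
      rw [List.map_append, List.map_map]
      congr 1
      · apply List.map_congr_left
        intro q hq
        rw [Function.comp_apply]
        by_cases he : p.1 = q.1
        · have h1 : (q.1 == p.1) = true := by simp [he]
          rw [if_pos h1]
          have hget : (PySem.Dict.mk (bs ++ [p])).get? p.1 = some p.2 :=
            pv_get?_append_self bs p hp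
          rw [← he]
          simp only [pvValC, hget]
          simp [hcurc, hne]
        · have h1 : (q.1 == p.1) = false := by
            simp only [beq_eq_false_iff_ne]; exact fun e => he e.symm
          rw [if_neg (by simp [h1])]
          unfold pvValC
          rw [pv_get?_append_of_ne bs p q.1 he]
      · have hno : ∀ r ∈ List.filter (fun (q : String × String) => !(PySem.Dict.mk incoming).contains q.1) current,
            (fun (r : String × String) => if (r.1 == p.1) = true then (p.1, (PySem.Dict.mk current).getD p.1 "") else r) r = r := by
          intro r hr
          have h1 : (r.1 == p.1) = false := by
            simp only [beq_eq_false_iff_ne]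
            intro e
            have := List.of_mem_filter hr
            rw [e] at this
            simp [hincc] at this
          simp [h1]
        rw [List.map_congr_left hno]
        simp
    · -- no-op step
      rw [if_neg hc]
      rw [hacc]
      congr 1
      apply List.map_congr_left
      intro q hq
      by_cases he : p.1 = q.1
      · -- q.1 = p.1: the step condition was false, and q ∈ incoming, so pvValC keeps v
        have hincc : (PySem.Dict.mk incoming).contains p.1 = true := by
          rw [pv_contains_mk, he]
          exact List.elem_eq_true_of_mem (List.mem_map_of_mem hq)
        have hget : (PySem.Dict.mk (bs ++ [p])).get? q.1 = some p.2 := by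
          rw [← he]; exact pv_get?_append_self bs p hp
        have hgetbs : (PySem.Dict.mk bs).get? q.1 = none := by
          rw [← he]
          exact (PySem.Dict.get?_eq_none_iff_not_mem_keys _ _).mpr (by simpa [PySem.Dict.keys] using hp)
        have hcond : ((PySem.Dict.mk current).contains p.1 && !((PySem.Dict.mk current).getD p.1 "" == p.2)) = false := by
          by_contra hx
          rcases Bool.and_eq_true _ _ |>.mp (eq_true_of_ne_false hx) with ⟨hA, hC⟩
          exact hc (by rw [hA, hincc, hC]; rfl)
        have hcond' := he ▸ hcond
        unfold pvValC
        rw [hget, hgetbs]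
        simp only [PySem.Dict.contains] at hcond'
        simp [hcond']
      · unfold pvValC
        rw [pv_get?_append_of_ne bs p q.1 he]

def pvValA (baseline : Option (List (String × String))) (cur inc : PySem.Dict String String) (key : String) : String :=
  if cur.contains key = false then inc.getD key ""
  else match baseline with
    | none => inc.getD key ""
    | some b =>
      if (PySem.Dict.mk b).contains key = false then inc.getD key ""
      else if cur.getD key "" == (PySem.Dict.mk b).getD key "" then inc.getD key ""
      else cur.getD key ""

lemma pvA_eq (baseline : Option (List (String × String))) (current incoming : List (String × String))
    (hcur : (current.map Prod.fst).Nodup) (hinc : (incoming.map Prod.fst).Nodup) :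
    merge_dict_field_py baseline current incoming =
      ((incoming.map Prod.fst) ++ (current.map Prod.fst).filter
          (fun k => !((incoming.map Prod.fst).contains k))).map
        (fun k => (k, if (PySem.Dict.mk incoming).contains k = false
                      then (PySem.Dict.mk current).getD k ""
                      else pvValA baseline (PySem.Dict.mk current) (PySem.Dict.mk incoming) k)) := by
  unfold merge_dict_field_py
  have hbody : (fun (r : PySem.Dict String String) key =>
      if (PySem.Dict.mk incoming).contains key = false then r.insert key ((PySem.Dict.mk current).getD key "")
      else if (PySem.Dict.mk current).contains key = false then r.insert key ((PySem.Dict.mk incoming).getD key "")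
      else match baseline with
        | none => r.insert key ((PySem.Dict.mk incoming).getD key "")
        | some b =>
          if (PySem.Dict.mk b).contains key = false then r.insert key ((PySem.Dict.mk incoming).getD key "")
          else if (PySem.Dict.mk current).getD key "" == (PySem.Dict.mk b).getD key "" then r.insert key ((PySem.Dict.mk incoming).getD key "")
          else r.insert key ((PySem.Dict.mk current).getD key ""))
      = (fun (r : PySem.Dict String String) key =>
          r.insert key (if (PySem.Dict.mk incoming).contains key = false
                        then (PySem.Dict.mk current).getD key ""
                        else pvValA baseline (PySem.Dict.mk current) (PySem.Dict.mk incoming) key)) := by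
    funext r key
    unfold pvValA
    by_cases h1 : (PySem.Dict.mk incoming).contains key = false
    · rw [if_pos h1, if_pos h1]
    · rw [if_neg h1, if_neg h1]
      cases baseline with
      | none =>
        show (if (PySem.Dict.mk current).contains key = false then r.insert key ((PySem.Dict.mk incoming).getD key "")
              else r.insert key ((PySem.Dict.mk incoming).getD key ""))
            = r.insert key (if (PySem.Dict.mk current).contains key = false then (PySem.Dict.mk incoming).getD key ""
              else (PySem.Dict.mk incoming).getD key "")
        split_ifs <;> rfl
      | some b =>
        show (if (PySem.Dict.mk current).contains key = false then r.insert key ((PySem.Dict.mk incoming).getD key "")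
              else if (PySem.Dict.mk b).contains key = false then r.insert key ((PySem.Dict.mk incoming).getD key "")
              else if ((PySem.Dict.mk current).getD key "" == (PySem.Dict.mk b).getD key "") = true then r.insert key ((PySem.Dict.mk incoming).getD key "")
              else r.insert key ((PySem.Dict.mk current).getD key ""))
            = r.insert key (if (PySem.Dict.mk current).contains key = false then (PySem.Dict.mk incoming).getD key ""
              else if (PySem.Dict.mk b).contains key = false then (PySem.Dict.mk incoming).getD key ""
              else if ((PySem.Dict.mk current).getD key "" == (PySem.Dict.mk b).getD key "") = true then (PySem.Dict.mk incoming).getD key ""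
              else (PySem.Dict.mk current).getD key "")
        split_ifs <;> rfl
  rw [hbody]
  have hkeys : PySem.Set.union (PySem.Set.ofList (PySem.Dict.keys (PySem.Dict.mk incoming)))
      (PySem.Set.ofList (PySem.Dict.keys (PySem.Dict.mk current)))
      = (incoming.map Prod.fst) ++ (current.map Prod.fst).filter
          (fun k => !((incoming.map Prod.fst).contains k)) := by
    show PySem.Set.update (PySem.Set.ofList (incoming.map Prod.fst)) (PySem.Set.ofList (current.map Prod.fst)) = _
    rw [pv_ofList_nodup _ hinc, pv_ofList_nodup _ hcur, pv_update_eq _ _ hcur]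
  rw [hkeys]
  have hnd : ((incoming.map Prod.fst) ++ (current.map Prod.fst).filter
      (fun k => !((incoming.map Prod.fst).contains k))).Nodup := by
    rw [List.nodup_append]
    refine ⟨hinc, hcur.filter _, ?_⟩
    intro a ha b hb e
    have hfb := List.of_mem_filter hb
    rw [← e] at hfb
    simp only [Bool.not_eq_true'] at hfb
    exact absurd ha (by simpa using hfb)
  have := PySem.Dict.items_foldl_insert_fresh
    ((incoming.map Prod.fst) ++ (current.map Prod.fst).filter
        (fun k => !((incoming.map Prod.fst).contains k)))
    (fun a => a)
    (fun key => if (PySem.Dict.mk incoming).contains key = false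
                then (PySem.Dict.mk current).getD key ""
                else pvValA baseline (PySem.Dict.mk current) (PySem.Dict.mk incoming) key)
    PySem.Dict.empty
    (fun a _ => by simp)
    (by simpa using hnd)
  simpa using this

lemma pv_val_agree (baseline : Option (List (String × String))) (current incoming : List (String × String))
    (q : String × String) (hq : q ∈ incoming) (hinc : (incoming.map Prod.fst).Nodup) :
    pvValA baseline (PySem.Dict.mk current) (PySem.Dict.mk incoming) q.1
      = pvValC current (baseline.getD []) q.1 q.2 := by
  have hgd : (PySem.Dict.mk incoming).getD q.1 "" = q.2 := by
    apply PySem.Dict.getD_of_mem_items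
    · show (q.1, q.2) ∈ incoming
      simpa using hq
    · simpa [PySem.Dict.keys] using hinc
  cases baseline with
  | none =>
    unfold pvValA pvValC
    simp only [Option.getD_none]
    have hbg : (PySem.Dict.mk ([] : List (String × String))).get? q.1 = none := rfl
    rw [hbg]
    split_ifs <;> simp [hgd]
  | some b =>
    unfold pvValA pvValC
    simp only [Option.getD_some]
    cases hbg : (PySem.Dict.mk b).get? q.1 with
    | none =>
      have hbc : (PySem.Dict.mk b).contains q.1 = false := by
        rw [PySem.Dict.contains_eq_isSome_get?, hbg]; rfl
      simp [hbc, hgd]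
    | some bv =>
      have hbc : (PySem.Dict.mk b).contains q.1 = true := by
        rw [PySem.Dict.contains_eq_isSome_get?, hbg]; rfl
      have hbd : (PySem.Dict.mk b).getD q.1 "" = bv := by
        rw [PySem.Dict.getD_eq_get?_getD, hbg]; rfl
      by_cases hcc : (PySem.Dict.mk current).contains q.1 = false
      · simp [hcc, hgd]
      · have hcc' : (PySem.Dict.mk current).contains q.1 = true := eq_true_of_ne_false hcc
        by_cases he : ((PySem.Dict.mk current).getD q.1 "" == bv) = true
        · simp [hcc', hbc, hbd, hgd, he]
        · have he' : ((PySem.Dict.mk current).getD q.1 "" == bv) = false := eq_false_of_ne_true he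
          simp [hcc', hbc, hbd, he']

theorem pv_main (baseline : Option (List (String × String))) (current incoming : List (String × String))
    (hcur : (current.map Prod.fst).Nodup) (hinc : (incoming.map Prod.fst).Nodup)
    (hb : ((baseline.getD []).map Prod.fst).Nodup) :
    merge_dict_field_py baseline current incoming = merge_dict_field_py_alt baseline current incoming := by
  rw [pvA_eq baseline current incoming hcur hinc]
  unfold merge_dict_field_py_alt
  have hbl : ∀ (bl : Option (List (String × String))),
      (match bl with | none => ([] : List (String × String)) | some b => b) = bl.getD [] := by
    intro bl; cases bl <;> rfl
  have hstage1 : (current.foldl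
        (fun (r : PySem.Dict String String) (kv : String × String) =>
          if (PySem.Dict.mk incoming).contains kv.1 = false then r.insert kv.1 kv.2 else r)
        (PySem.Dict.mk incoming))
      = PySem.Dict.mk (incoming ++ current.filter (fun q => !(PySem.Dict.mk incoming).contains q.1)) := by
    apply PySem.Dict.ext
    rw [pvB_stage1 incoming current hcur]
  rw [hbl baseline, hstage1, pvB_stage2 current incoming (baseline.getD []) hb]
  rw [List.map_append]
  congr 1
  · rw [List.map_map]
    apply List.map_congr_left
    intro q hq
    have hcont : ¬ (PySem.Dict.mk incoming).contains q.1 = false := by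
      rw [pv_contains_mk]
      simp only [Bool.not_eq_false]
      exact List.elem_eq_true_of_mem (List.mem_map_of_mem hq)
    rw [Function.comp_apply]
    rw [if_neg hcont]
    rw [pv_val_agree baseline current incoming q hq hinc]
  · rw [List.filter_map]
    have hpred : ((fun k => !((incoming.map Prod.fst).contains k)) ∘ Prod.fst)
        = (fun (q : String × String) => !(PySem.Dict.mk incoming).contains q.1) := by
      funext q
      rw [Function.comp_apply, pv_contains_mk]
    rw [hpred, List.map_map]
    have : ∀ q ∈ List.filter (fun (q : String × String) => !(PySem.Dict.mk incoming).contains q.1) current,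
        ((fun k => (k, if (PySem.Dict.mk incoming).contains k = false
                      then (PySem.Dict.mk current).getD k ""
                      else pvValA baseline (PySem.Dict.mk current) (PySem.Dict.mk incoming) k)) ∘ Prod.fst) q = q := by
      intro q hq
      have hmem : q ∈ current := List.mem_of_mem_filter hq
      have hcont : (PySem.Dict.mk incoming).contains q.1 = false := by
        have := List.of_mem_filter hq
        simpa using this
      rw [Function.comp_apply, if_pos hcont]
      have : (PySem.Dict.mk current).getD q.1 "" = q.2 := by
        apply PySem.Dict.getD_of_mem_items
        · show (q.1, q.2) ∈ current
          simpa using hmem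
        · simpa [PySem.Dict.keys] using hcur
      rw [this]
    rw [List.map_congr_left this]
    simp

-- ===== VERDICT (by name: the statement is the Claim_ definition above) =====
theorem merge_dict_field_py_spec : Claim_equal_merge_dict_field_py := by
  intro baseline current incoming _ hpre
  show merge_dict_field_py baseline current incoming = merge_dict_field_py_alt baseline current incoming
  exact pv_main baseline current incoming hpre.1 hpre.2.1 hpre.2.2
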